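-- pv_equiv track=rewrite | github.com/stopkite/Python-Algorithm | 프로그래머스/Lv2/[1차] 뉴스 클러스터링.py | get_pair_dict
-- ===== SOURCE A (Python) =====
-- def get_pair_dict(s):
--     s = s.upper()
--     dict = {}
--     for i in range(0, len(s) - 1):
--         if not s[i].isalpha() or not s[i + 1].isalpha():
--             continue
--         w = s[i] + s[i + 1]
--
--         if w not in dict:
--             dict[w] = 1
--         else:
--             dict[w] += 1
--     return dict
-- ===== SOURCE B (Python) =====
-- def get_pair_dict(s):
--     s = s.upper()
--     # phase 1: maximal runs of alphabetic characters
--     runs = []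
--     cur = ""
--     for ch in s:
--         if ch.isalpha():
--             cur += ch
--         else:
--             if cur:
--                 runs.append(cur)
--             cur = ""
--     if cur:
--         runs.append(cur)
--     # phase 2: count adjacent pairs inside each run
--     d = {}
--     for run in runs:
--         for i in range(len(run) - 1):
--             w = run[i:i + 2]
--             d[w] = d.get(w, 0) + 1
--     return d
-- ===== Notes on version B (the rewrite author's own statement) =====
-- stated objective: alternative
-- what changed: B replaces A's single index loop with per-position isalpha tests by a two-phase algorithm: first extract the maximal runs of alphabetic characters, then count adjacent bigrams inside each run via slicing and dict.get.
import Mathlib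
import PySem

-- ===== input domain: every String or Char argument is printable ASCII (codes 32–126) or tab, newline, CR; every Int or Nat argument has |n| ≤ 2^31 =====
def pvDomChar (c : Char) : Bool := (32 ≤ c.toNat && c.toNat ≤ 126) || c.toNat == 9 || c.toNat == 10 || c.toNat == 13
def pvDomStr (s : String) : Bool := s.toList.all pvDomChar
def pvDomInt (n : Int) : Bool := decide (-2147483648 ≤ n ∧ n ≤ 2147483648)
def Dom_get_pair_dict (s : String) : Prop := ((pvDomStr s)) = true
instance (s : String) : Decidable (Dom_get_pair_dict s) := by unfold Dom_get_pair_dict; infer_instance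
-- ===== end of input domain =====

-- B restructures A's single index loop into two explicit phases (extract maximal alphabetic runs, then count bigrams inside each run); same result, same cost.

-- ===== PORT A =====
-- loop body of A: for i in range(0, len(s)-1): if not s[i].isalpha() or not s[i+1].isalpha(): continue; w = s[i]+s[i+1]; dict update
def pvBodyA (cs : List Char) (d : PySem.Dict String Int) (i : Int) : PySem.Dict String Int :=
  match PySem.List.pyGet? cs i, PySem.List.pyGet? cs (i + 1) with
  | some a, some b =>
    if !(PySem.Chars.isalpha a) || !(PySem.Chars.isalpha b) then d
    else
      let w := String.mk [a, b]
      match PySem.Dict.get? d w with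
      | none => PySem.Dict.insert d w 1
      | some v => PySem.Dict.insert d w (v + 1)
  | _, _ => d   -- unreachable: i and i+1 are always in range

def get_pair_dict (s : String) : List (String × Int) :=
  let cs := (PySem.Str.upper s).toList
  ((PySem.List.pyRange 0 ((cs.length : Int) - 1) 1).foldl (pvBodyA cs) PySem.Dict.empty).items

-- ===== PORT B =====
-- phase-1 loop body: grow the current alphabetic run or close it off
def pvF1 (acc : List (List Char) × List Char) (ch : Char) : List (List Char) × List Char :=
  if PySem.Chars.isalpha ch then (acc.1, acc.2 ++ [ch])
  else if acc.2 ≠ [] then (acc.1 ++ [acc.2], []) else (acc.1, [])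

-- after the loop: if cur: runs.append(cur)
def pvFinish (st : List (List Char) × List Char) : List (List Char) :=
  if st.2 ≠ [] then st.1 ++ [st.2] else st.1

def pvRuns (cs : List Char) : List (List Char) :=
  pvFinish (cs.foldl pvF1 ([], []))

-- phase-2 inner loop body: w = run[i:i+2]; d[w] = d.get(w, 0) + 1
def pvBodyB (run : List Char) (d : PySem.Dict String Int) (i : Int) : PySem.Dict String Int :=
  let w := String.mk (PySem.List.slice run (some i) (some (i + 2)))
  PySem.Dict.insert d w (PySem.Dict.getD d w 0 + 1)

def get_pair_dict_alt (s : String) : List (String × Int) :=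
  let cs := (PySem.Str.upper s).toList
  ((pvRuns cs).foldl (fun d run =>
      (PySem.List.pyRange 0 ((run.length : Int) - 1) 1).foldl (pvBodyB run) d)
    PySem.Dict.empty).items

-- ===== PRECONDITION & SPEC =====
def Spec_get_pair_dict (s : String) (out : List (String × Int)) : Prop := out = get_pair_dict_alt s
instance (s : String) (out : List (String × Int)) : Decidable (Spec_get_pair_dict s out) := by unfold Spec_get_pair_dict; infer_instance

-- ===== CLAIM (what is proved, stated in full; the proofs are below) =====
def Claim_equal_get_pair_dict : Prop := ∀ (s : String), Dom_get_pair_dict s → Spec_get_pair_dict s (get_pair_dict s)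

-- ===== LEMMAS AND PROOFS =====

-- the common dict update, and the two bigram streams
def pvStep (d : PySem.Dict String Int) (w : String) : PySem.Dict String Int :=
  PySem.Dict.insert d w (PySem.Dict.getD d w 0 + 1)

-- adjacent pairs of a list (no filtering)
def pvPairs : List Char → List String
  | a :: b :: t => String.mk [a, b] :: pvPairs (b :: t)
  | _ => []

-- adjacent pairs where both chars are alphabetic (A's bigram stream)
def pvBig : List Char → List String
  | a :: b :: t =>
      if PySem.Chars.isalpha a && PySem.Chars.isalpha b
      then String.mk [a, b] :: pvBig (b :: t) else pvBig (b :: t)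
  | _ => []

lemma pvBig_short (l : List Char) (h : l.length ≤ 1) : pvBig l = [] := by
  match l with
  | [] => rfl
  | [a] => rfl
  | a :: b :: t => simp at h

lemma pvPairs_short (l : List Char) (h : l.length ≤ 1) : pvPairs l = [] := by
  match l with
  | [] => rfl
  | [a] => rfl
  | a :: b :: t => simp at h

lemma pvBodyA_eq_step (cs : List Char) (d : PySem.Dict String Int) (k : Nat)
    (hk : k + 1 < cs.length) :
    pvBodyA cs d (k : Int)
      = if PySem.Chars.isalpha cs[k] && PySem.Chars.isalpha cs[k+1]
        then pvStep d (String.mk [cs[k], cs[k+1]]) else d := by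
  have h1 : PySem.List.pyGet? cs (k : Int) = some cs[k] := by
    rw [PySem.List.pyGet?_natCast]; exact List.getElem?_eq_getElem (by omega)
  have h2 : PySem.List.pyGet? cs ((k : Int) + 1) = some cs[k+1] := by
    have : (k : Int) + 1 = ((k + 1 : Nat) : Int) := by push_cast; ring
    rw [this, PySem.List.pyGet?_natCast]; exact List.getElem?_eq_getElem hk
  unfold pvBodyA
  rw [h1, h2]
  cases ha : PySem.Chars.isalpha cs[k] <;> cases hb : PySem.Chars.isalpha cs[k+1] <;>
    simp [ha, hb, pvStep] <;>
    cases hg : PySem.Dict.get? d (String.mk [cs[k], cs[k+1]]) <;>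
    simp [PySem.Dict.getD_eq_get?_getD, hg]

lemma pvA_loop (cs : List Char) : ∀ (m k : Nat) (d : PySem.Dict String Int),
    cs.length - k ≤ m →
    (PySem.List.pyRange (k : Int) ((cs.length : Int) - 1) 1).foldl (pvBodyA cs) d
      = (pvBig (cs.drop k)).foldl pvStep d := by
  intro m
  induction m with
  | zero =>
    intro k d hm
    rw [PySem.List.pyRange_one_eq_nil (by omega)]
    rw [pvBig_short _ (by simp; omega)]
    rfl
  | succ m ih =>
    intro k d hm
    by_cases h : k + 1 < cs.length
    · rw [PySem.List.pyRange_one_cons (by omega)]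
      have hd1 : cs.drop k = cs[k] :: cs.drop (k + 1) :=
        List.drop_eq_getElem_cons (by omega)
      have hd2 : cs.drop (k + 1) = cs[k+1] :: cs.drop (k + 2) :=
        List.drop_eq_getElem_cons (by omega)
      have hcast : (k : Int) + 1 = ((k + 1 : Nat) : Int) := by push_cast; ring
      rw [List.foldl_cons, pvBodyA_eq_step cs d k h, hcast, ih (k + 1) _ (by omega)]
      rw [hd1, hd2]
      conv_rhs => rw [pvBig]
      by_cases hab : (PySem.Chars.isalpha cs[k] && PySem.Chars.isalpha cs[k+1]) = true
      · simp only [hab, if_true, List.foldl_cons]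
      · simp only [hab]
        simp
    · rw [PySem.List.pyRange_one_eq_nil (by omega)]
      rw [pvBig_short _ (by simp; omega)]
      rfl

lemma pvBodyB_eq_step (run : List Char) (d : PySem.Dict String Int) (k : Nat)
    (hk : k + 1 < run.length) :
    pvBodyB run d (k : Int) = pvStep d (String.mk [run[k], run[k+1]]) := by
  unfold pvBodyB pvStep
  have hcast : (k : Int) + 2 = ((k + 2 : Nat) : Int) := by push_cast; ring
  have hsl : PySem.List.slice run (some (k : Int)) (some ((k : Int) + 2))
      = [run[k], run[k+1]] := by
    rw [hcast, PySem.List.slice_natCast]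
    have h1 : run.drop k = run[k] :: run.drop (k + 1) :=
      List.drop_eq_getElem_cons (by omega)
    have h2 : run.drop (k + 1) = run[k+1] :: run.drop (k + 2) :=
      List.drop_eq_getElem_cons (by omega)
    have h3 : k + 2 - k = 2 := by omega
    rw [h3, h1, h2]
    rfl
  rw [hsl]

lemma pvB_inner (run : List Char) : ∀ (m k : Nat) (d : PySem.Dict String Int),
    run.length - k ≤ m →
    (PySem.List.pyRange (k : Int) ((run.length : Int) - 1) 1).foldl (pvBodyB run) d
      = (pvPairs (run.drop k)).foldl pvStep d := by
  intro m
  induction m with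
  | zero =>
    intro k d hm
    rw [PySem.List.pyRange_one_eq_nil (by omega)]
    rw [pvPairs_short _ (by simp; omega)]
    rfl
  | succ m ih =>
    intro k d hm
    by_cases h : k + 1 < run.length
    · rw [PySem.List.pyRange_one_cons (by omega)]
      have hd1 : run.drop k = run[k] :: run.drop (k + 1) :=
        List.drop_eq_getElem_cons (by omega)
      have hd2 : run.drop (k + 1) = run[k+1] :: run.drop (k + 2) :=
        List.drop_eq_getElem_cons (by omega)
      have hcast : (k : Int) + 1 = ((k + 1 : Nat) : Int) := by push_cast; ring
      rw [List.foldl_cons, pvBodyB_eq_step run d k h, hcast, ih (k + 1) _ (by omega)]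
      rw [hd1, hd2]
      rfl
    · rw [PySem.List.pyRange_one_eq_nil (by omega)]
      rw [pvPairs_short _ (by simp; omega)]
      rfl

-- pvBig splits at any non-alphabetic character
lemma pvBig_split (c : Char) (hc : PySem.Chars.isalpha c = false) :
    ∀ (xs ys : List Char), pvBig (xs ++ c :: ys) = pvBig xs ++ pvBig ys := by
  intro xs
  induction xs with
  | nil =>
    intro ys
    cases ys with
    | nil => rfl
    | cons y t => simp [pvBig, hc]
  | cons a xs ih =>
    intro ys
    cases xs with
    | nil =>
      cases ys with
      | nil => simp [pvBig, hc]
      | cons y t => simp [pvBig, hc]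
    | cons b t =>
      have := ih ys
      simp only [List.cons_append] at this ⊢
      rw [pvBig, pvBig]
      rw [this]
      by_cases hab : PySem.Chars.isalpha a && PySem.Chars.isalpha b <;> simp [hab]

-- on an all-alphabetic list the filtered stream is just the adjacent pairs
lemma pvBig_eq_pvPairs : ∀ (l : List Char),
    l.all PySem.Chars.isalpha = true → pvBig l = pvPairs l := by
  intro l
  induction l with
  | nil => intro _; rfl
  | cons a xs ih =>
    intro h
    cases xs with
    | nil => rfl
    | cons b t =>
      simp only [List.all_cons, Bool.and_eq_true] at h
      rw [pvBig, pvPairs]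
      have ha : PySem.Chars.isalpha a = true := h.1
      have hb : PySem.Chars.isalpha b = true := h.2.1
      rw [ha, hb]
      simp only [Bool.and_self, if_true]
      rw [ih (by simp [hb, h.2.2])]

lemma pvBig_cons_not_alpha (c : Char) (hc : PySem.Chars.isalpha c = false)
    (t : List Char) : pvBig (c :: t) = pvBig t := by
  cases t with
  | nil => rfl
  | cons y ys => simp [pvBig, hc]

-- phase-1 invariant: the bigrams of the collected runs are A's bigram stream
lemma pvRuns_inv : ∀ (cs : List Char) (rs : List (List Char)) (cur : List Char),
    cur.all PySem.Chars.isalpha = true →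
    ((pvFinish (cs.foldl pvF1 (rs, cur))).flatMap pvPairs)
      = rs.flatMap pvPairs ++ pvBig (cur ++ cs) := by
  intro cs
  induction cs with
  | nil =>
    intro rs cur hcur
    simp only [List.foldl_nil, List.append_nil, pvFinish]
    by_cases h : cur ≠ []
    · simp [h, pvBig_eq_pvPairs cur hcur]
    · simp only [ne_eq, not_not] at h
      subst h
      simp [pvBig]
  | cons ch t ih =>
    intro rs cur hcur
    simp only [List.foldl_cons]
    by_cases ha : PySem.Chars.isalpha ch = true
    · have : pvF1 (rs, cur) ch = (rs, cur ++ [ch]) := by simp [pvF1, ha]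
      rw [this, ih rs (cur ++ [ch]) (by simp_all)]
      rw [List.append_cons cur ch t]
    · have ha' : PySem.Chars.isalpha ch = false := by simpa using ha
      by_cases hc : cur ≠ []
      · have : pvF1 (rs, cur) ch = (rs ++ [cur], []) := by simp [pvF1, ha', hc]
        rw [this, ih (rs ++ [cur]) [] (by simp)]
        rw [pvBig_split ch ha' cur t]
        simp [pvBig_eq_pvPairs cur hcur]
      · simp only [ne_eq, not_not] at hc
        subst hc
        have hstep : pvF1 (rs, ([] : List Char)) ch = (rs, []) := by simp [pvF1, ha']
        rw [hstep, ih rs [] (by simp)]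
        simp [pvBig_cons_not_alpha ch ha' t]

lemma pvOuter (runs : List (List Char)) : ∀ (d : PySem.Dict String Int),
    runs.foldl (fun d run =>
        (PySem.List.pyRange 0 ((run.length : Int) - 1) 1).foldl (pvBodyB run) d) d
      = (runs.flatMap pvPairs).foldl pvStep d := by
  induction runs with
  | nil => intro d; rfl
  | cons r rt ih =>
    intro d
    simp only [List.foldl_cons, List.flatMap_cons, List.foldl_append]
    have h0 : (0 : Int) = ((0 : Nat) : Int) := rfl
    rw [h0, pvB_inner r r.length 0 d (by omega)]
    simp only [List.drop_zero]
    exact ih _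

-- ===== VERDICT (by name: the statement is the Claim_ definition above) =====
lemma pv_main (cs : List Char) :
    ((PySem.List.pyRange 0 ((cs.length : Int) - 1) 1).foldl (pvBodyA cs) PySem.Dict.empty).items
      = ((pvRuns cs).foldl (fun d run =>
          (PySem.List.pyRange 0 ((run.length : Int) - 1) 1).foldl (pvBodyB run) d)
          PySem.Dict.empty).items := by
  have hA : (PySem.List.pyRange 0 ((cs.length : Int) - 1) 1).foldl (pvBodyA cs) PySem.Dict.empty
      = (pvBig cs).foldl pvStep PySem.Dict.empty := by
    have h0 : (0 : Int) = ((0 : Nat) : Int) := rfl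
    rw [h0, pvA_loop cs cs.length 0 PySem.Dict.empty (by omega)]
    simp
  have hB : (pvRuns cs).foldl (fun d run =>
        (PySem.List.pyRange 0 ((run.length : Int) - 1) 1).foldl (pvBodyB run) d) PySem.Dict.empty
      = (pvBig cs).foldl pvStep PySem.Dict.empty := by
    rw [pvOuter]
    unfold pvRuns
    rw [pvRuns_inv cs [] [] (by simp)]
    simp
  rw [hA, hB]

theorem get_pair_dict_spec : Claim_equal_get_pair_dict := by
  intro s _
  show get_pair_dict s = get_pair_dict_alt s
  exact pv_main ((PySem.Str.upper s).toList)
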